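-- pv_equiv track=rewrite | github.com/YicLiu005/EECS-AI-Tutor | answer_score_module.py | _merge_breakdowns
-- ===== SOURCE A (Python) =====
-- from typing import Any, Dict, List, Literal, Optional, Tuple
--
-- def _merge_breakdowns(a: Dict[str, int], b: Dict[str, int]) -> Dict[str, int]:
--     out = dict(a)
--     for k, v in b.items():
--         if k in out:
--             # Average if both provide the same dimension
--             out[k] = int(round((out[k] + v) / 2))
--         else:
--             out[k] = v
--     return out
-- ===== SOURCE B (Python) =====
-- def _merge_breakdowns(a, b):
--     """Aggregate-then-finalize: one accumulation pass sums values and counts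
--     occurrences per key over both dicts, then a finalize pass emits the sum for
--     singleton keys and the rounded half-sum for shared keys."""
--     total = {}
--     count = {}
--     for d in (a, b):
--         for k, v in d.items():
--             total[k] = total.get(k, 0) + v
--             count[k] = count.get(k, 0) + 1
--     return {k: t if count[k] == 1 else int(round(t / 2)) for k, t in total.items()}
-- ===== Notes on version B (the rewrite author's own statement) =====
-- stated objective: alternative
-- what changed: B replaces A's copy-then-update merge (membership test and average inside the loop over b) by an aggregate-then-finalize algorithm: one accumulation pass builds per-key sum and occurrence-count dicts over both inputs, then a finalize pass emits the sum for singleton keys and the rounded half-sum where the count is 2.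
import Mathlib
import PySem

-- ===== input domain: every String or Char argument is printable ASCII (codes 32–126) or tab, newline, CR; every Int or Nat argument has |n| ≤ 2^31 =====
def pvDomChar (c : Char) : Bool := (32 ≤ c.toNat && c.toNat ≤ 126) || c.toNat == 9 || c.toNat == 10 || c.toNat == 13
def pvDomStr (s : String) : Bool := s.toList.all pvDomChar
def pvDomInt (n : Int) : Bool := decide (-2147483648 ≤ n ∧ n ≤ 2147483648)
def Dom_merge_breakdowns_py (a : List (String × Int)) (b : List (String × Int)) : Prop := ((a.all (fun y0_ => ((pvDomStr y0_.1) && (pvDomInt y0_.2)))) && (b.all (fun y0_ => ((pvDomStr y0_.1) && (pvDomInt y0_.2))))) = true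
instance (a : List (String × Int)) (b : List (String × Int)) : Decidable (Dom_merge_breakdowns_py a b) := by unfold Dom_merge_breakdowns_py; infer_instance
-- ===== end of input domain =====

-- B replaces A's copy-then-update merge by an aggregate-then-finalize algorithm:
-- one accumulation pass builds per-key sum and count dicts over both inputs, then a
-- finalize pass emits the sum (count 1) or the rounded half-sum (count 2).
-- Objective: alternative decomposition, same cost.

-- Hand port of Python's `int(round(s / 2))` on an int s: for |s| ≤ 2^32 the float s/2 is
-- exact, so this is round-half-to-even of s/2 — exact on the Dom bound.
def pyHalfRound (s : Int) : Int :=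
  let m := PySem.Int.floordiv s 2
  if PySem.Int.mod s 2 == 0 then m
  else if PySem.Int.mod m 2 == 0 then m else m + 1

-- ===== PORT A =====
def merge_breakdowns_py (a : List (String × Int)) (b : List (String × Int)) : List (String × Int) :=
  let out := PySem.Dict.ofList a                    -- out = dict(a)
  let out := (PySem.Dict.ofList b).items.foldl      -- for k, v in b.items():
    (fun out kv =>
      if out.contains kv.1 then out.insert kv.1 (pyHalfRound (out.getD kv.1 0 + kv.2))
      else out.insert kv.1 kv.2) out
  out.items

-- ===== PORT B =====
def merge_breakdowns_py_alt (a : List (String × Int)) (b : List (String × Int)) : List (String × Int) :=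
  let da := PySem.Dict.ofList a
  let db := PySem.Dict.ofList b
  -- accumulation pass: for d in (a, b): for k, v in d.items(): total[k] += v; count[k] += 1
  let tc := (da.items ++ db.items).foldl
    (fun (p : PySem.Dict String Int × PySem.Dict String Int) kv =>
      (p.1.insert kv.1 (p.1.getD kv.1 0 + kv.2), p.2.insert kv.1 (p.2.getD kv.1 0 + 1)))
    (PySem.Dict.empty, PySem.Dict.empty)
  -- finalize pass: {k: t if count[k] == 1 else int(round(t / 2)) for k, t in total.items()}
  tc.1.items.map (fun kv =>
    (kv.1, if tc.2.getD kv.1 0 == 1 then kv.2 else pyHalfRound kv.2))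

-- ===== PRECONDITION & SPEC =====
def Spec_merge_breakdowns_py (a : List (String × Int)) (b : List (String × Int)) (out : List (String × Int)) : Prop := out = merge_breakdowns_py_alt a b
instance (a : List (String × Int)) (b : List (String × Int)) (out : List (String × Int)) : Decidable (Spec_merge_breakdowns_py a b out) := by unfold Spec_merge_breakdowns_py; infer_instance

-- ===== CLAIM (what is proved, stated in full; the proofs are below) =====
def Claim_equal_merge_breakdowns_py : Prop := ∀ (a : List (String × Int)) (b : List (String × Int)), Dom_merge_breakdowns_py a b → Spec_merge_breakdowns_py a b (merge_breakdowns_py a b)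

-- ===== LEMMAS AND PROOFS =====

-- A's loop body and the value it writes, named for the proofs
def mval (d : PySem.Dict String Int) (kv : String × Int) : Int :=
  if d.contains kv.1 then pyHalfRound (d.getD kv.1 0 + kv.2) else kv.2

def mstep (d : PySem.Dict String Int) (kv : String × Int) : PySem.Dict String Int :=
  if d.contains kv.1 then d.insert kv.1 (pyHalfRound (d.getD kv.1 0 + kv.2))
  else d.insert kv.1 kv.2

lemma mstep_eq_insert (d : PySem.Dict String Int) (kv : String × Int) :
    mstep d kv = d.insert kv.1 (mval d kv) := by
  unfold mstep mval; split_ifs <;> rfl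

lemma mstep_funext : mstep = fun d kv => d.insert kv.1 (mval d kv) :=
  funext fun d => funext fun kv => mstep_eq_insert d kv

lemma A_eq (a b : List (String × Int)) :
    merge_breakdowns_py a b
      = ((PySem.Dict.ofList b).items.foldl mstep (PySem.Dict.ofList a)).items := rfl

lemma foldl_mstep_keys (l : List (String × Int)) (d : PySem.Dict String Int) :
    (l.foldl mstep d).keys = PySem.Set.update d.keys (l.map Prod.fst) := by
  rw [mstep_funext]
  exact PySem.Dict.keys_foldl_insert_key l Prod.fst mval d

lemma foldl_mstep_nodup (l : List (String × Int)) (d : PySem.Dict String Int)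
    (h : d.keys.Nodup) : (l.foldl mstep d).keys.Nodup := by
  rw [mstep_funext]
  exact PySem.Dict.nodup_keys_foldl_insert_key l Prod.fst mval d h

lemma foldl_mstep_getD_of_not_mem (l : List (String × Int)) (d : PySem.Dict String Int)
    (k : String) (h : k ∉ l.map Prod.fst) :
    (l.foldl mstep d).getD k 0 = d.getD k 0 := by
  induction l generalizing d with
  | nil => rfl
  | cons kv t ih =>
    simp only [List.map_cons, List.mem_cons, not_or] at h
    simp only [List.foldl_cons]
    rw [ih (mstep d kv) h.2, mstep_eq_insert,
        PySem.Dict.getD_insert_of_ne d (mval d kv) 0 h.1]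

lemma foldl_mstep_getD_of_mem (l : List (String × Int)) (d : PySem.Dict String Int)
    (k : String) (v : Int) (hnd : (l.map Prod.fst).Nodup) (hm : (k, v) ∈ l) :
    (l.foldl mstep d).getD k 0
      = if d.contains k then pyHalfRound (d.getD k 0 + v) else v := by
  induction l generalizing d with
  | nil => cases hm
  | cons kv t ih =>
    simp only [List.map_cons, List.nodup_cons] at hnd
    simp only [List.foldl_cons]
    rcases List.mem_cons.mp hm with h | h
    · subst h
      rw [foldl_mstep_getD_of_not_mem t (mstep d (k, v)) k hnd.1,
          mstep_eq_insert, PySem.Dict.getD_insert_self]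
      rfl
    · have hk : k ≠ kv.1 := by
        intro he; exact hnd.1 (he ▸ List.mem_map.mpr ⟨(k, v), h, rfl⟩)
      rw [ih (mstep d kv) hnd.2 h, mstep_eq_insert,
          PySem.Dict.getD_insert_of_ne d (mval d kv) 0 hk,
          PySem.Dict.contains_insert]
      have : (k == kv.1) = false := by simp [hk]
      rw [this, Bool.false_or]

-- B's accumulation step and its components
def tcStep (p : PySem.Dict String Int × PySem.Dict String Int) (kv : String × Int) :
    PySem.Dict String Int × PySem.Dict String Int :=
  (p.1.insert kv.1 (p.1.getD kv.1 0 + kv.2), p.2.insert kv.1 (p.2.getD kv.1 0 + 1))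

def stepT (t : PySem.Dict String Int) (kv : String × Int) : PySem.Dict String Int :=
  t.insert kv.1 (t.getD kv.1 0 + kv.2)

def stepC (c : PySem.Dict String Int) (kv : String × Int) : PySem.Dict String Int :=
  c.insert kv.1 (c.getD kv.1 0 + 1)

lemma foldl_tcStep_split (l : List (String × Int))
    (t c : PySem.Dict String Int) :
    l.foldl tcStep (t, c) = (l.foldl stepT t, l.foldl stepC c) := by
  induction l generalizing t c with
  | nil => rfl
  | cons kv tl ih => simpa [tcStep, stepT, stepC] using ih _ _

lemma B_eq (a b : List (String × Int)) :
    merge_breakdowns_py_alt a b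
      = (((PySem.Dict.ofList a).items ++ (PySem.Dict.ofList b).items).foldl stepT PySem.Dict.empty).items.map
          (fun kv => (kv.1,
            if (((PySem.Dict.ofList a).items ++ (PySem.Dict.ofList b).items).foldl stepC PySem.Dict.empty).getD kv.1 0 == 1
            then kv.2 else pyHalfRound kv.2)) := by
  show (((PySem.Dict.ofList a).items ++ (PySem.Dict.ofList b).items).foldl tcStep
          (PySem.Dict.empty, PySem.Dict.empty)).1.items.map
        (fun kv => (kv.1,
          if (((PySem.Dict.ofList a).items ++ (PySem.Dict.ofList b).items).foldl tcStep
                (PySem.Dict.empty, PySem.Dict.empty)).2.getD kv.1 0 == 1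
          then kv.2 else pyHalfRound kv.2)) = _
  rw [foldl_tcStep_split]

lemma foldl_stepT_keys (l : List (String × Int)) (d : PySem.Dict String Int) :
    (l.foldl stepT d).keys = PySem.Set.update d.keys (l.map Prod.fst) :=
  PySem.Dict.keys_foldl_insert_key l Prod.fst (fun t kv => t.getD kv.1 0 + kv.2) d

lemma foldl_stepT_nodup (l : List (String × Int)) (d : PySem.Dict String Int)
    (h : d.keys.Nodup) : (l.foldl stepT d).keys.Nodup :=
  PySem.Dict.nodup_keys_foldl_insert_key l Prod.fst (fun t kv => t.getD kv.1 0 + kv.2) d h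

lemma foldl_stepT_getD_of_not_mem (l : List (String × Int)) (d : PySem.Dict String Int)
    (k : String) (h : k ∉ l.map Prod.fst) :
    (l.foldl stepT d).getD k 0 = d.getD k 0 := by
  induction l generalizing d with
  | nil => rfl
  | cons kv t ih =>
    simp only [List.map_cons, List.mem_cons, not_or] at h
    simp only [List.foldl_cons]
    rw [ih _ h.2]
    show (d.insert kv.1 _).getD k 0 = d.getD k 0
    exact PySem.Dict.getD_insert_of_ne d _ 0 h.1

lemma foldl_stepT_getD_of_mem (l : List (String × Int)) (d : PySem.Dict String Int)
    (k : String) (v : Int) (hnd : (l.map Prod.fst).Nodup) (hm : (k, v) ∈ l) :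
    (l.foldl stepT d).getD k 0 = d.getD k 0 + v := by
  induction l generalizing d with
  | nil => cases hm
  | cons kv t ih =>
    simp only [List.map_cons, List.nodup_cons] at hnd
    simp only [List.foldl_cons]
    rcases List.mem_cons.mp hm with h | h
    · subst h
      rw [foldl_stepT_getD_of_not_mem t _ k hnd.1]
      show (d.insert k (d.getD k 0 + v)).getD k 0 = d.getD k 0 + v
      rw [PySem.Dict.getD_insert_self]
    · have hk : k ≠ kv.1 := by
        intro he; exact hnd.1 (he ▸ List.mem_map.mpr ⟨(k, v), h, rfl⟩)
      rw [ih _ hnd.2 h]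
      show (d.insert kv.1 _).getD k 0 + v = d.getD k 0 + v
      rw [PySem.Dict.getD_insert_of_ne d _ 0 hk]

lemma foldl_stepC_getD_of_not_mem (l : List (String × Int)) (d : PySem.Dict String Int)
    (k : String) (h : k ∉ l.map Prod.fst) :
    (l.foldl stepC d).getD k 0 = d.getD k 0 := by
  induction l generalizing d with
  | nil => rfl
  | cons kv t ih =>
    simp only [List.map_cons, List.mem_cons, not_or] at h
    simp only [List.foldl_cons]
    rw [ih _ h.2]
    show (d.insert kv.1 _).getD k 0 = d.getD k 0
    exact PySem.Dict.getD_insert_of_ne d _ 0 h.1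

lemma foldl_stepC_getD_of_mem (l : List (String × Int)) (d : PySem.Dict String Int)
    (k : String) (hnd : (l.map Prod.fst).Nodup) (hm : k ∈ l.map Prod.fst) :
    (l.foldl stepC d).getD k 0 = d.getD k 0 + 1 := by
  induction l generalizing d with
  | nil => cases hm
  | cons kv t ih =>
    simp only [List.map_cons, List.nodup_cons] at hnd
    simp only [List.map_cons, List.mem_cons] at hm
    simp only [List.foldl_cons]
    rcases hm with h | h
    · subst h
      rw [foldl_stepC_getD_of_not_mem t _ kv.1 hnd.1]
      show (d.insert kv.1 (d.getD kv.1 0 + 1)).getD kv.1 0 = d.getD kv.1 0 + 1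
      rw [PySem.Dict.getD_insert_self]
    · have hk : k ≠ kv.1 := by intro he; exact hnd.1 (he ▸ h)
      rw [ih _ hnd.2 h]
      show (d.insert kv.1 _).getD k 0 + 1 = d.getD k 0 + 1
      rw [PySem.Dict.getD_insert_of_ne d _ 0 hk]

-- ===== VERDICT (by name: the statement is the Claim_ definition above) =====
theorem merge_breakdowns_py_spec : Claim_equal_merge_breakdowns_py := by
  intro a b _
  unfold Spec_merge_breakdowns_py
  have hndA : (PySem.Dict.ofList a : PySem.Dict String Int).keys.Nodup := PySem.Dict.nodup_keys_ofList a
  have hndB : (PySem.Dict.ofList b : PySem.Dict String Int).keys.Nodup := PySem.Dict.nodup_keys_ofList b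
  have hitemsA : (PySem.Dict.ofList a : PySem.Dict String Int).items.map Prod.fst
      = (PySem.Dict.ofList a : PySem.Dict String Int).keys := rfl
  have hitemsB : (PySem.Dict.ofList b : PySem.Dict String Int).items.map Prod.fst
      = (PySem.Dict.ofList b : PySem.Dict String Int).keys := rfl
  set ia := (PySem.Dict.ofList a : PySem.Dict String Int).items with hia
  set ib := (PySem.Dict.ofList b : PySem.Dict String Int).items with hib
  -- key lists of both results coincide
  have hkeysA : ((ib.foldl mstep (PySem.Dict.ofList a))).keys
      = PySem.Set.update (PySem.Dict.ofList a : PySem.Dict String Int).keys (ib.map Prod.fst) :=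
    foldl_mstep_keys ib _
  have hkeysB : (((ia ++ ib).foldl stepT PySem.Dict.empty)).keys
      = PySem.Set.update (PySem.Dict.ofList a : PySem.Dict String Int).keys (ib.map Prod.fst) := by
    rw [foldl_stepT_keys, PySem.Dict.keys_empty, List.map_append,
        PySem.Set.update_append, PySem.Set.update_nil_left, hitemsA,
        PySem.Set.ofList_eq_self_of_nodup _ hndA]
  have hndRA : ((ib.foldl mstep (PySem.Dict.ofList a))).keys.Nodup :=
    foldl_mstep_nodup ib _ hndA
  have hndRB : (((ia ++ ib).foldl stepT PySem.Dict.empty)).keys.Nodup :=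
    foldl_stepT_nodup _ _ PySem.Dict.nodup_keys_empty
  rw [A_eq a b, B_eq a b,
      PySem.Dict.items_eq_map_keys _ hndRA 0,
      PySem.Dict.items_eq_map_keys _ hndRB 0, List.map_map, ← hia, ← hib,
      hkeysA, hkeysB]
  apply List.map_congr_left
  intro k hk
  simp only [Function.comp]
  have hndmA : (ia.map Prod.fst).Nodup := by rw [hitemsA]; exact hndA
  have hndmB : (ib.map Prod.fst).Nodup := by rw [hitemsB]; exact hndB
  by_cases hbm : k ∈ ib.map Prod.fst
  · -- k is a key of b
    obtain ⟨p, hp, hpk⟩ := List.mem_map.mp hbm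
    have hmemB : (k, p.2) ∈ ib := by rw [← hpk]; simpa using hp
    set vb := p.2 with hvb
    by_cases ham : k ∈ ia.map Prod.fst
    · -- shared key: count 2, total = va + vb
      obtain ⟨q, hq, hqk⟩ := List.mem_map.mp ham
      have hmemA : (k, q.2) ∈ ia := by rw [← hqk]; simpa using hq
      set va := q.2 with hva
      have hcA : (PySem.Dict.ofList a : PySem.Dict String Int).contains k = true :=
        (PySem.Dict.contains_iff_mem_keys _ k).mpr (by rw [← hitemsA]; exact ham)
      have haD : (PySem.Dict.ofList a : PySem.Dict String Int).getD k 0 = va :=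
        PySem.Dict.getD_of_mem_items _ hmemA hndA 0
      have hT : ((ia ++ ib).foldl stepT PySem.Dict.empty).getD k 0 = va + vb := by
        rw [List.foldl_append,
            foldl_stepT_getD_of_mem ib _ k vb hndmB hmemB,
            foldl_stepT_getD_of_mem ia _ k va hndmA hmemA,
            PySem.Dict.getD_empty]
        ring
      have hC : ((ia ++ ib).foldl stepC PySem.Dict.empty).getD k 0 = 2 := by
        rw [List.foldl_append,
            foldl_stepC_getD_of_mem ib _ k hndmB hbm,
            foldl_stepC_getD_of_mem ia _ k hndmA ham,
            PySem.Dict.getD_empty]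
        norm_num
      rw [foldl_mstep_getD_of_mem ib _ k vb hndmB hmemB, hT, hC, hcA, haD]
      norm_num
    · -- only in b: count 1, total = vb
      have hcA : (PySem.Dict.ofList a : PySem.Dict String Int).contains k = false := by
        by_contra h
        exact ham (by rw [hitemsA]
                      exact (PySem.Dict.contains_iff_mem_keys _ k).mp (by simpa using h))
      have hT : ((ia ++ ib).foldl stepT PySem.Dict.empty).getD k 0 = vb := by
        rw [List.foldl_append,
            foldl_stepT_getD_of_mem ib _ k vb hndmB hmemB,
            foldl_stepT_getD_of_not_mem ia _ k ham,
            PySem.Dict.getD_empty]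
        ring
      have hC : ((ia ++ ib).foldl stepC PySem.Dict.empty).getD k 0 = 1 := by
        rw [List.foldl_append,
            foldl_stepC_getD_of_mem ib _ k hndmB hbm,
            foldl_stepC_getD_of_not_mem ia _ k ham,
            PySem.Dict.getD_empty]
        ring
      rw [foldl_mstep_getD_of_mem ib _ k vb hndmB hmemB, hT, hC, hcA]
      norm_num
  · -- k only in a: count 1, total = va
    have ham : k ∈ ia.map Prod.fst := by
      rcases (PySem.Set.mem_update _ _ _).mp hk with h | h
      · rw [hitemsA]; exact h
      · exact absurd h hbm
    obtain ⟨q, hq, hqk⟩ := List.mem_map.mp ham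
    have hmemA : (k, q.2) ∈ ia := by rw [← hqk]; simpa using hq
    set va := q.2 with hva
    have haD : (PySem.Dict.ofList a : PySem.Dict String Int).getD k 0 = va :=
      PySem.Dict.getD_of_mem_items _ hmemA hndA 0
    have hT : ((ia ++ ib).foldl stepT PySem.Dict.empty).getD k 0 = va := by
      rw [List.foldl_append,
          foldl_stepT_getD_of_not_mem ib _ k hbm,
          foldl_stepT_getD_of_mem ia _ k va hndmA hmemA,
          PySem.Dict.getD_empty]
      ring
    have hC : ((ia ++ ib).foldl stepC PySem.Dict.empty).getD k 0 = 1 := by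
      rw [List.foldl_append,
          foldl_stepC_getD_of_not_mem ib _ k hbm,
          foldl_stepC_getD_of_mem ia _ k hndmA ham,
          PySem.Dict.getD_empty]
      ring
    rw [foldl_mstep_getD_of_not_mem ib _ k hbm, hT, hC, haD]
    norm_num
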